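-- pv_equiv track=rewrite | github.com/Elijah-Huang/Competitive-Programming | Problems/Usaco/Usaco Gateway/Chapter 2/Part 3/Longest Prefix.py | generate_prefix
-- ===== SOURCE A (Python) =====
-- from collections import deque
--
-- def generate_prefix(s,primitives):
--     current_prefixes = deque([0])
--     visited = set()
--     while current_prefixes:
--         length = current_prefixes.popleft()
--         if length in visited:
--             pass
--         else:
--             visited.add(length)
--             for primitive in primitives:
--                 if primitive == s[length : length + len(primitive)]:
--                     current_prefixes.append(length + len(primitive))
--     return(max(visited))
-- ===== SOURCE B (Python) =====
-- def generate_prefix(s, primitives):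
--     n = len(s)
--     pset = set(primitives)
--     lens = {len(p) for p in primitives}
--     reach = [False] * (n + 1)
--     reach[0] = True
--     best = 0
--     for i in range(n + 1):
--         if reach[i]:
--             best = i
--             for L in lens:
--                 if i + L <= n and s[i:i+L] in pset:
--                     reach[i + L] = True
--     return best
-- ===== Notes on version B (the rewrite author's own statement) =====
-- stated objective: faster
-- what changed: Replaces A's deque-BFS over prefix lengths (visited set, per-position scan comparing every primitive by slicing, final max()) with a forward dynamic-programming scan of a boolean reachability array that per position tests one hashed slice per distinct primitive length against a set of the primitives, tracking the running maximum.
import Mathlib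
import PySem

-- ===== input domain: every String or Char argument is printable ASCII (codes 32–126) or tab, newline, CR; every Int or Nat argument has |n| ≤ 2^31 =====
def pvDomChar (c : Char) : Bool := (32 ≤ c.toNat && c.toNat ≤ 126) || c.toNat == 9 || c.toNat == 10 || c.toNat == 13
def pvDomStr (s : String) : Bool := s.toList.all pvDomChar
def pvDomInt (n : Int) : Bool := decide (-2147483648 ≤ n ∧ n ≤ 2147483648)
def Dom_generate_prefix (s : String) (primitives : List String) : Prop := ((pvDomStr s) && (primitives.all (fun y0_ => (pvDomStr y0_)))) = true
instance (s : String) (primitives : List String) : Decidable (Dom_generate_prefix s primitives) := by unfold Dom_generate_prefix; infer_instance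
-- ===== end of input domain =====

-- B replaces A's deque-BFS over prefix lengths by a forward boolean-array scan testing
-- slices against a hash set of the primitives grouped by their distinct lengths (alternative
-- algorithm; fewer comparisons when primitives share lengths).

-- ===== PORT A =====
-- successors pushed for one popped `length`: the inner `for primitive in primitives` loop
def pvSuccs (cs : List Char) (prims : List (List Char)) (length : Int) : List Int :=
  prims.foldl (fun acc p =>
    if p = PySem.List.slice cs (some length) (some (length + (p.length : Int)))
    then acc ++ [length + (p.length : Int)] else acc) []

-- the `while current_prefixes:` loop; fuel only makes it total (proved sufficient below)
def pvBfs (cs : List Char) (prims : List (List Char)) :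
    Nat → List Int → PySem.Set Int → PySem.Set Int
  | 0, _, vis => vis
  | _ + 1, [], vis => vis
  | fuel + 1, length :: q, vis =>
    if vis.contains length then pvBfs cs prims fuel q vis
    else pvBfs cs prims fuel (q ++ pvSuccs cs prims length) (vis.add length)

def generate_prefix (s : String) (primitives : List String) : Int :=
  let cs := s.toList
  let prims := primitives.map String.toList
  let vis := pvBfs cs prims ((cs.length + 1) * (prims.length + 1) + 1) [0] PySem.Set.empty
  -- max(visited); visited always contains 0, so the `.getD 0` default is never used
  (PySem.List.max? vis (fun x => x)).getD 0

-- ===== PORT B =====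
-- inner `for L in lens:` loop of Source B (iteration order of the set is irrelevant: it only
-- sets flags to true); indices are nonnegative, so s[i:i+L] is (cs.drop i).take L exactly
def pvInner (cs : List Char) (n : Nat) (pset : PySem.Set (List Char))
    (lens : PySem.Set Nat) (i : Nat) (r : List Bool) : List Bool :=
  lens.foldl (fun r L =>
    if i + L ≤ n ∧ pset.contains ((cs.drop i).take L) = true
    then r.set (i + L) true else r) r

-- body of `for i in range(n + 1):`
def pvStep (cs : List Char) (n : Nat) (pset : PySem.Set (List Char))
    (lens : PySem.Set Nat) (st : List Bool × Nat) (i : Nat) : List Bool × Nat :=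
  if st.1.getD i false then (pvInner cs n pset lens i st.1, i) else st

def generate_prefix_alt (s : String) (primitives : List String) : Int :=
  let cs := s.toList
  let n := cs.length
  let pset : PySem.Set (List Char) := PySem.Set.ofList (primitives.map String.toList)
  let lens : PySem.Set Nat := PySem.Set.ofList (primitives.map (fun p => p.toList.length))
  let st := (List.range (n + 1)).foldl (pvStep cs n pset lens)
    ((List.replicate (n + 1) false).set 0 true, 0)
  (st.2 : Int)

-- ===== PRECONDITION & SPEC =====
def Spec_generate_prefix (s : String) (primitives : List String) (out : Int) : Prop := out = generate_prefix_alt s primitives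
instance (s : String) (primitives : List String) (out : Int) : Decidable (Spec_generate_prefix s primitives out) := by unfold Spec_generate_prefix; infer_instance

-- ===== CLAIM (what is proved, stated in full; the proofs are below) =====
def Claim_equal_generate_prefix : Prop := ∀ (s : String) (primitives : List String), Dom_generate_prefix s primitives → Spec_generate_prefix s primitives (generate_prefix s primitives)

-- ===== LEMMAS AND PROOFS =====

-- `i --p--> i + |p|` when primitive p matches s at position i
def pvEdge (cs : List Char) (prims : List (List Char)) (i j : Nat) : Prop :=
  ∃ p ∈ prims, List.take p.length (List.drop i cs) = p ∧ j = i + p.length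

-- prefix length j is decomposable into primitives
def pvReach (cs : List Char) (prims : List (List Char)) (j : Nat) : Prop :=
  Relation.ReflTransGen (pvEdge cs prims) 0 j

lemma pvEdge_ge {cs prims i j} (h : pvEdge cs prims i j) : i ≤ j := by
  obtain ⟨p, _, _, rfl⟩ := h; omega

lemma pvEdge_le {cs : List Char} {prims i j} (hi : i ≤ cs.length)
    (h : pvEdge cs prims i j) : j ≤ cs.length := by
  obtain ⟨p, _, hm, rfl⟩ := h
  have := congrArg List.length hm
  simp [List.length_take, List.length_drop] at this
  omega

lemma pvReach_zero (cs prims) : pvReach cs prims 0 := Relation.ReflTransGen.refl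

lemma pvReach_le {cs : List Char} {prims j} (h : pvReach cs prims j) : j ≤ cs.length := by
  induction h with
  | refl => omega
  | tail _ e ih => exact pvEdge_le ih e

lemma pvSuccs_eq (cs prims l) : pvSuccs cs prims l =
    (prims.filter (fun p => decide (p = PySem.List.slice cs (some l) (some (l + (p.length : Int)))))).map
      (fun p => l + (p.length : Int)) := by
  have := PySem.List.foldl_append_if
    (fun p : List Char => decide (p = PySem.List.slice cs (some l) (some (l + (p.length : Int)))))
    (fun p : List Char => l + (p.length : Int)) prims []
  simpa [pvSuccs] using this

-- membership of the successor list computed by A's inner loop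
lemma pvSuccs_mem {cs prims} (m : Nat) (j : Int) :
    j ∈ pvSuccs cs prims (m : Int) ↔ ∃ k : Nat, pvEdge cs prims m k ∧ j = (k : Int) := by
  rw [pvSuccs_eq]
  simp only [List.mem_map, List.mem_filter, decide_eq_true_eq]
  constructor
  · rintro ⟨p, ⟨hp, hsl⟩, rfl⟩
    have hs : PySem.List.slice cs (some (m:Int)) (some ((m:Int) + (p.length:Int)))
        = List.take p.length (List.drop m cs) := by
      rw [PySem.List.slice_toNat cs (by positivity) (by positivity)]
      congr 1
      omega
    exact ⟨m + p.length, ⟨p, hp, (hsl.trans hs).symm, rfl⟩, by push_cast; ring⟩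
  · rintro ⟨k, ⟨p, hp, hmt, rfl⟩, rfl⟩
    refine ⟨p, ⟨hp, ?_⟩, by push_cast; ring⟩
    rw [PySem.List.slice_toNat cs (by positivity) (by positivity)]
    have h2 : ((m : Int) + (p.length : Int)).toNat - ((m : Int)).toNat = p.length := by omega
    rw [h2, Int.toNat_natCast, hmt]

lemma pvSuccs_len {cs prims} (l : Int) : (pvSuccs cs prims l).length ≤ prims.length := by
  rw [pvSuccs_eq]; simpa using List.length_filter_le _ _

-- a duplicate-free list of casts of naturals ≤ n has at most n+1 elements
lemma pvCard {n : Nat} {vis : List Int} (hnd : vis.Nodup)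
    (hv : ∀ v ∈ vis, ∃ m : Nat, m ≤ n ∧ v = (m : Int)) : vis.length ≤ n + 1 := by
  have hsub : vis.toFinset ⊆ (Finset.range (n+1)).image (fun m : Nat => (m : Int)) := by
    intro v hvv
    rw [List.mem_toFinset] at hvv
    obtain ⟨m, hm, rfl⟩ := hv v hvv
    exact Finset.mem_image.2 ⟨m, Finset.mem_range.2 (by omega), rfl⟩
  calc vis.length = vis.toFinset.card := (List.toFinset_card_of_nodup hnd).symm
    _ ≤ _ := Finset.card_le_card hsub
    _ ≤ (Finset.range (n+1)).card := Finset.card_image_le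
    _ = n + 1 := Finset.card_range _

-- nodes reachable from a visited node are visited or reachable from the queue
lemma pvClosed {cs prims} {q vis : List Int}
    (hcl : ∀ m : Nat, (m : Int) ∈ vis → ∀ k, pvEdge cs prims m k →
      (k : Int) ∈ vis ∨ (k : Int) ∈ q)
    {x j : Nat} (hx : (x : Int) ∈ vis)
    (h : Relation.ReflTransGen (pvEdge cs prims) x j) :
    (j : Int) ∈ vis ∨ ∃ mi : Nat, (mi : Int) ∈ q ∧ Relation.ReflTransGen (pvEdge cs prims) mi j := by
  induction h using Relation.ReflTransGen.head_induction_on with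
  | refl => exact Or.inl hx
  | head e hr ih =>
    rename_i a c
    rcases hcl a hx c e with hv | hq
    · exact ih hv
    · exact Or.inr ⟨c, hq, hr⟩

-- BFS characterisation: with sufficient fuel, the result is vis ∪ (reachable from q)
lemma pvBfs_mem {cs prims} : ∀ (fuel : Nat) (q : List Int) (vis : PySem.Set Int),
    (∀ l ∈ q, ∃ m : Nat, m ≤ cs.length ∧ l = (m : Int)) →
    (∀ v ∈ vis, ∃ m : Nat, m ≤ cs.length ∧ v = (m : Int)) →
    List.Nodup vis →
    (∀ m : Nat, (m : Int) ∈ vis → ∀ k, pvEdge cs prims m k →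
      (k : Int) ∈ vis ∨ (k : Int) ∈ q) →
    q.length + (prims.length + 1) * (cs.length + 1 - vis.length) ≤ fuel →
    ∀ j : Int, (j ∈ pvBfs cs prims fuel q vis ↔ j ∈ vis ∨
      ∃ mi m : Nat, (mi : Int) ∈ q ∧ Relation.ReflTransGen (pvEdge cs prims) mi m ∧ j = (m : Int)) := by
  intro fuel
  induction fuel with
  | zero =>
    intro q vis hq hv hnd hcl hfuel j
    have hq0 : q = [] := List.eq_nil_of_length_eq_zero (by omega)
    subst hq0
    simp [pvBfs]
  | succ fuel ih =>
    intro q vis hq hv hnd hcl hfuel j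
    match q with
    | [] => simp [pvBfs]
    | l :: q' =>
      obtain ⟨ml, hml, rfl⟩ := hq l (List.mem_cons_self)
      by_cases hl : ((ml : Int)) ∈ vis
      · have hc : PySem.Set.contains vis (ml : Int) = true := by
          simpa [PySem.Set.contains, List.contains_iff_mem] using hl
        have hstep : pvBfs cs prims (fuel+1) ((ml : Int) :: q') vis = pvBfs cs prims fuel q' vis := by
          rw [pvBfs, hc]; simp
        rw [hstep]
        have hcl' : ∀ m : Nat, (m : Int) ∈ vis → ∀ k, pvEdge cs prims m k →
            (k : Int) ∈ vis ∨ (k : Int) ∈ q' := by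
          intro m hm k e
          rcases hcl m hm k e with h | h
          · exact Or.inl h
          · rcases List.mem_cons.1 h with h' | h'
            · exact Or.inl (h' ▸ hl)
            · exact Or.inr h'
        rw [ih q' vis (fun l hlq => hq l (List.mem_cons_of_mem _ hlq)) hv hnd hcl'
          (by simp at hfuel ⊢; omega) j]
        constructor
        · rintro (h | ⟨mi, m, hmi, hrf, rfl⟩)
          · exact Or.inl h
          · exact Or.inr ⟨mi, m, List.mem_cons_of_mem _ hmi, hrf, rfl⟩
        · rintro (h | ⟨mi, m, hmi, hrf, rfl⟩)
          · exact Or.inl h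
          · rcases List.mem_cons.1 hmi with h' | h'
            · have : mi = ml := by exact_mod_cast h'
              subst this
              rcases pvClosed hcl' hl hrf with h2 | ⟨mi', h2, h3⟩
              · exact Or.inl h2
              · exact Or.inr ⟨mi', m, h2, h3, rfl⟩
            · exact Or.inr ⟨mi, m, h', hrf, rfl⟩
      · have hc : PySem.Set.contains vis (ml : Int) = false := by
          simpa [PySem.Set.contains, List.contains_iff_mem] using hl
        have hstep : pvBfs cs prims (fuel+1) ((ml : Int) :: q') vis
            = pvBfs cs prims fuel (q' ++ pvSuccs cs prims (ml : Int)) (vis ++ [(ml : Int)]) := by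
          rw [pvBfs, hc]; simp [PySem.Set.add, PySem.Set.contains, hl]
        rw [hstep]
        have hq'' : ∀ l ∈ q' ++ pvSuccs cs prims (ml : Int),
            ∃ m : Nat, m ≤ cs.length ∧ l = (m : Int) := by
          intro l hlm
          rcases List.mem_append.1 hlm with h | h
          · exact hq l (List.mem_cons_of_mem _ h)
          · obtain ⟨k, hk, rfl⟩ := (pvSuccs_mem ml l).1 h
            exact ⟨k, pvEdge_le hml hk, rfl⟩
        have hv'' : ∀ v ∈ vis ++ [(ml : Int)], ∃ m : Nat, m ≤ cs.length ∧ v = (m : Int) := by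
          intro v hvm
          rcases List.mem_append.1 hvm with h | h
          · exact hv v h
          · exact ⟨ml, hml, by simpa using h⟩
        have hnd'' : List.Nodup (vis ++ [(ml : Int)]) := by
          simp [List.nodup_append, hnd]
          exact fun a ha h => hl (h ▸ ha)
        have hcl'' : ∀ m : Nat, (m : Int) ∈ vis ++ [(ml : Int)] → ∀ k, pvEdge cs prims m k →
            (k : Int) ∈ vis ++ [(ml : Int)] ∨ (k : Int) ∈ q' ++ pvSuccs cs prims (ml : Int) := by
          intro m hm k e
          rcases List.mem_append.1 hm with h | h
          · rcases hcl m h k e with h2 | h2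
            · exact Or.inl (List.mem_append.2 (Or.inl h2))
            · rcases List.mem_cons.1 h2 with h3 | h3
              · exact Or.inl (List.mem_append.2 (Or.inr (by simpa using h3)))
              · exact Or.inr (List.mem_append.2 (Or.inl h3))
          · have hmm : m = ml := by simpa using h
            subst hmm
            exact Or.inr (List.mem_append.2 (Or.inr ((pvSuccs_mem m (k : Int)).2 ⟨k, e, rfl⟩)))
        have hfuel'' : (q' ++ pvSuccs cs prims (ml : Int)).length
            + (prims.length + 1) * (cs.length + 1 - (vis ++ [(ml : Int)]).length) ≤ fuel := by
          have hvl : (vis ++ [(ml : Int)]).length ≤ cs.length + 1 := pvCard hnd'' hv''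
          have hsl := pvSuccs_len (cs := cs) (prims := prims) (ml : Int)
          simp [List.length_append] at hvl ⊢
          have hA : (prims.length + 1) * (cs.length + 1 - vis.length)
              = (prims.length + 1) * (cs.length - vis.length) + (prims.length + 1) := by
            have h1 : cs.length + 1 - vis.length = (cs.length - vis.length) + 1 := by omega
            rw [h1, Nat.mul_succ]
          rw [hA] at hfuel
          simp at hfuel
          omega
        rw [ih _ _ hq'' hv'' hnd'' hcl'' hfuel'' j]
        constructor
        · rintro (h | ⟨mi, m, hmi, hrf, rfl⟩)
          · rcases List.mem_append.1 h with h2 | h2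
            · exact Or.inl h2
            · exact Or.inr ⟨ml, ml, List.mem_cons_self, Relation.ReflTransGen.refl, by simpa using h2⟩
          · rcases List.mem_append.1 hmi with h2 | h2
            · exact Or.inr ⟨mi, m, List.mem_cons_of_mem _ h2, hrf, rfl⟩
            · obtain ⟨k, hk, hkk⟩ := (pvSuccs_mem ml ((mi : Int))).1 h2
              have : mi = k := by exact_mod_cast hkk
              subst this
              exact Or.inr ⟨ml, m, List.mem_cons_self, Relation.ReflTransGen.head hk hrf, rfl⟩
        · rintro (h | ⟨mi, m, hmi, hrf, rfl⟩)
          · exact Or.inl (List.mem_append.2 (Or.inl h))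
          · rcases List.mem_cons.1 hmi with h2 | h2
            · have : mi = ml := by exact_mod_cast h2
              subst this
              rcases (Relation.ReflTransGen.cases_head hrf) with h3 | ⟨c, he, h3⟩
              · exact Or.inl (List.mem_append.2 (Or.inr (by simp [h3])))
              · exact Or.inr ⟨c, m, List.mem_append.2 (Or.inr ((pvSuccs_mem mi (c : Int)).2 ⟨c, he, rfl⟩)),
                  h3, rfl⟩
            · exact Or.inr ⟨mi, m, List.mem_append.2 (Or.inl h2), hrf, rfl⟩

-- A's visited set contains exactly the reachable prefix lengths
lemma pvA_mem {cs prims} (j : Int) :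
    j ∈ pvBfs cs prims ((cs.length + 1) * (prims.length + 1) + 1) [0] PySem.Set.empty ↔
      ∃ m : Nat, pvReach cs prims m ∧ j = (m : Int) := by
  have h := pvBfs_mem (cs := cs) (prims := prims) ((cs.length + 1) * (prims.length + 1) + 1)
    [0] PySem.Set.empty
    (by rintro l hl; refine ⟨0, by omega, by simpa using hl⟩)
    (by rintro v hv; simp [PySem.Set.empty] at hv)
    (by simp [PySem.Set.empty])
    (by rintro m hm; simp [PySem.Set.empty] at hm)
    (by simp [PySem.Set.empty, Nat.mul_comm]; omega)
    j
  rw [h]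
  constructor
  · rintro (h0 | ⟨mi, m, hmi, hrf, rfl⟩)
    · simp [PySem.Set.empty] at h0
    · have h1 : (mi : Int) = 0 := List.mem_singleton.1 hmi
      have h2 : mi = 0 := by exact_mod_cast h1
      subst h2
      exact ⟨m, hrf, rfl⟩
  · rintro ⟨m, hrf, rfl⟩
    exact Or.inr ⟨0, m, by simp, hrf, rfl⟩

-- reachable using only steps out of positions < i
inductive pvRB (cs : List Char) (prims : List (List Char)) : Nat → Nat → Prop
  | zero (i : Nat) : pvRB cs prims i 0
  | step {i j k : Nat} : pvRB cs prims i j → j < i → pvEdge cs prims j k → pvRB cs prims i k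

lemma pvRB_mono {cs prims i i' j} (h : i ≤ i') (hr : pvRB cs prims i j) : pvRB cs prims i' j := by
  induction hr with
  | zero => exact pvRB.zero i'
  | step _ hlt e ih => exact pvRB.step ih (by omega) e

lemma pvRB_reach {cs prims i j} (h : pvRB cs prims i j) : pvReach cs prims j := by
  induction h with
  | zero => exact pvReach_zero cs prims
  | step _ _ e ih => exact Relation.ReflTransGen.tail ih e

lemma pvReach_RB {cs prims k} (h : pvReach cs prims k) : pvRB cs prims k k := by
  induction h with
  | refl => exact pvRB.zero 0
  | tail hr e ih =>
    rename_i b c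
    have hbc : b ≤ c := pvEdge_ge e
    rcases Nat.lt_or_ge b c with hlt | hge
    · exact pvRB.step (pvRB_mono (by omega) ih) hlt e
    · have : b = c := by omega
      subst this; exact ih

lemma pvRB_succ_iff {cs prims i j} :
    pvRB cs prims (i + 1) j ↔ pvRB cs prims i j ∨ (pvRB cs prims i i ∧ pvEdge cs prims i j) := by
  constructor
  · intro h
    induction h with
    | zero => exact Or.inl (pvRB.zero i)
    | step hr hlt e ih =>
      rename_i a b
      rcases Nat.lt_or_ge a i with hlt' | hge
      · rcases ih with h1 | ⟨h1, h2⟩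
        · exact Or.inl (pvRB.step h1 hlt' e)
        · exact absurd (pvEdge_ge h2) (by omega)
      · have ha : a = i := by omega
        subst ha
        rcases ih with h1 | ⟨h1, _⟩
        · exact Or.inr ⟨h1, e⟩
        · exact Or.inr ⟨h1, e⟩
  · rintro (h | ⟨h1, h2⟩)
    · exact pvRB_mono (by omega) h
    · exact pvRB.step (pvRB_mono (by omega) h1) (by omega) h2

lemma pvInnerFold {cs : List Char} {pset : PySem.Set (List Char)} {i : Nat} :
    ∀ (ls : List Nat) (r : List Bool), r.length = cs.length + 1 →
      (ls.foldl (fun r L => if i + L ≤ cs.length ∧ pset.contains ((cs.drop i).take L) = true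
          then r.set (i + L) true else r) r).length = cs.length + 1 ∧
      ∀ j, ((ls.foldl (fun r L => if i + L ≤ cs.length ∧ pset.contains ((cs.drop i).take L) = true
          then r.set (i + L) true else r) r).getD j false = true ↔
        (r.getD j false = true ∨
          ∃ L ∈ ls, i + L ≤ cs.length ∧ pset.contains ((cs.drop i).take L) = true ∧ j = i + L)) := by
  intro ls
  induction ls with
  | nil => intro r hr; exact ⟨hr, fun j => by simp⟩
  | cons L ls ih =>
    intro r hr
    simp only [List.foldl_cons]
    by_cases hc : i + L ≤ cs.length ∧ pset.contains ((cs.drop i).take L) = true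
    · rw [if_pos hc]
      obtain ⟨hlen, hiff⟩ := ih (r.set (i + L) true) (by simpa using hr)
      refine ⟨hlen, fun j => ?_⟩
      rw [hiff j]
      have hlt : i + L < r.length := by omega
      have hset : (r.set (i + L) true).getD j false = true ↔ (j = i + L ∨ r.getD j false = true) := by
        rw [List.getD_eq_getElem?_getD, List.getElem?_set, List.getD_eq_getElem?_getD]
        split_ifs with h
        · simp [h]
        · have hne : ¬ (j = i + L) := fun hj => h hj.symm
          simp [hne]
      rw [hset]
      constructor
      · rintro ((h | h) | ⟨L', hL', h1, h2, rfl⟩)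
        · exact Or.inr ⟨L, List.mem_cons_self, hc.1, hc.2, h⟩
        · exact Or.inl h
        · exact Or.inr ⟨L', List.mem_cons_of_mem _ hL', h1, h2, rfl⟩
      · rintro (h | ⟨L', hL', h1, h2, rfl⟩)
        · exact Or.inl (Or.inr h)
        · rcases List.mem_cons.1 hL' with h3 | h3
          · subst h3; exact Or.inl (Or.inl rfl)
          · exact Or.inr ⟨L', h3, h1, h2, rfl⟩
    · rw [if_neg hc]
      obtain ⟨hlen, hiff⟩ := ih r hr
      refine ⟨hlen, fun j => ?_⟩
      rw [hiff j]
      constructor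
      · rintro (h | ⟨L', hL', h1, h2, rfl⟩)
        · exact Or.inl h
        · exact Or.inr ⟨L', List.mem_cons_of_mem _ hL', h1, h2, rfl⟩
      · rintro (h | ⟨L', hL', h1, h2, rfl⟩)
        · exact Or.inl h
        · rcases List.mem_cons.1 hL' with h3 | h3
          · exact absurd ⟨h3 ▸ h1, h3 ▸ h2⟩ hc
          · exact Or.inr ⟨L', h3, h1, h2, rfl⟩

-- B's inner loop sets exactly the edge targets out of i
lemma pvInner_spec {cs : List Char} {prims : List (List Char)} {i : Nat} {r : List Bool}
    (hi : i ≤ cs.length) (hr : r.length = cs.length + 1) :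
    (pvInner cs cs.length (PySem.Set.ofList prims)
        (PySem.Set.ofList (prims.map List.length)) i r).length = cs.length + 1 ∧
    ∀ j, ((pvInner cs cs.length (PySem.Set.ofList prims)
        (PySem.Set.ofList (prims.map List.length)) i r).getD j false = true ↔
      r.getD j false = true ∨ pvEdge cs prims i j) := by
  obtain ⟨hlen, hiff⟩ := pvInnerFold (cs := cs) (pset := PySem.Set.ofList prims) (i := i)
    (PySem.Set.ofList (prims.map List.length)) r hr
  refine ⟨hlen, fun j => ?_⟩
  rw [pvInner, hiff j]
  have hcond : (∃ L ∈ (PySem.Set.ofList (prims.map List.length) : List Nat), i + L ≤ cs.length ∧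
      (PySem.Set.ofList prims).contains ((cs.drop i).take L) = true ∧ j = i + L) ↔
      pvEdge cs prims i j := by
    constructor
    · rintro ⟨L, hL, hle, hcont, rfl⟩
      have hp : (cs.drop i).take L ∈ prims := by
        have h1 : ((cs.drop i).take L) ∈ (PySem.Set.ofList prims : List (List Char)) :=
          List.contains_iff_mem.1 hcont
        exact (PySem.Set.mem_ofList prims _).1 h1
      have hlenp : ((cs.drop i).take L).length = L := by
        simp [List.length_take, List.length_drop]; omega
      exact ⟨(cs.drop i).take L, hp, by rw [hlenp], by rw [hlenp]⟩
    · rintro ⟨p, hp, hm, rfl⟩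
      refine ⟨p.length, (PySem.Set.mem_ofList _ _).2 (List.mem_map.2 ⟨p, hp, rfl⟩), ?_, ?_, rfl⟩
      · have := congrArg List.length hm
        simp [List.length_take, List.length_drop] at this
        omega
      · rw [hm]
        exact List.contains_iff_mem.2 ((PySem.Set.mem_ofList prims p).2 hp)
  rw [hcond]

-- invariant of B's scan over range(n+1)
lemma pvScan_inv {cs : List Char} {prims : List (List Char)} : ∀ (i : Nat),
    i ≤ cs.length + 1 →
    ∀ st, st = (List.range i).foldl
        (pvStep cs cs.length (PySem.Set.ofList prims)
          (PySem.Set.ofList (prims.map List.length)))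
        ((List.replicate (cs.length + 1) false).set 0 true, 0) →
      st.1.length = cs.length + 1 ∧
      (∀ j, (st.1.getD j false = true ↔ pvRB cs prims i j)) ∧
      (i = 0 → st.2 = 0) ∧
      (0 < i → pvReach cs prims st.2 ∧ st.2 < i ∧ ∀ j < i, pvReach cs prims j → j ≤ st.2) := by
  intro i
  induction i with
  | zero =>
    intro _ st hst
    subst hst
    simp only [List.range_zero, List.foldl_nil]
    refine ⟨by simp, fun j => ?_, by trivial, fun h => absurd h (by omega)⟩
    constructor
    · intro h
      rcases Nat.eq_zero_or_pos j with hj | hj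
      · subst hj; exact pvRB.zero 0
      · exfalso
        rw [List.getD_eq_getElem?_getD, List.getElem?_set] at h
        have hne : ¬ (0 = j) := by omega
        rw [if_neg hne] at h
        rcases Nat.lt_or_ge j (cs.length + 1) with h2 | h2
        · simp [h2] at h
        · rw [List.getElem?_eq_none (by simpa using h2)] at h
          simp at h
    · intro h
      cases h with
      | zero => simp [List.getD_eq_getElem?_getD]
      | step _ hlt _ => omega
  | succ i ih =>
    intro hi st hst
    rw [List.range_succ, List.foldl_append, List.foldl_cons, List.foldl_nil] at hst
    obtain ⟨h1, h2, h3, h4⟩ := ih (by omega) _ rfl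
    set prev := (List.range i).foldl
        (pvStep cs cs.length (PySem.Set.ofList prims)
          (PySem.Set.ofList (prims.map List.length)))
        ((List.replicate (cs.length + 1) false).set 0 true, 0) with hprev
    by_cases hgi : prev.1.getD i false = true
    · have hRBii : pvRB cs prims i i := (h2 i).1 hgi
      rw [pvStep, if_pos hgi] at hst
      obtain ⟨hlen', hiff'⟩ := pvInner_spec (prims := prims) (by omega : i ≤ cs.length) h1
      subst hst
      refine ⟨hlen', fun j => ?_, by omega, fun _ => ?_⟩
      · rw [hiff' j, h2 j, pvRB_succ_iff]
        constructor
        · rintro (h | h)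
          · exact Or.inl h
          · exact Or.inr ⟨hRBii, h⟩
        · rintro (h | ⟨_, h⟩)
          · exact Or.inl h
          · exact Or.inr h
      · exact ⟨pvRB_reach hRBii, by omega, fun j hj _ => by omega⟩
    · have hnRB : ¬ pvRB cs prims i i := fun h => hgi ((h2 i).2 h)
      rw [pvStep, if_neg hgi] at hst
      subst hst
      have hipos : 0 < i := by
        rcases Nat.eq_zero_or_pos i with h | h
        · subst h; exact absurd (pvRB.zero 0) hnRB
        · exact h
      obtain ⟨hr, hlt, hmax⟩ := h4 hipos
      refine ⟨h1, fun j => ?_, by omega, fun _ => ⟨hr, by omega, fun j hj hrj => ?_⟩⟩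
      · rw [h2 j, pvRB_succ_iff]
        constructor
        · exact Or.inl
        · rintro (h | ⟨h, _⟩)
          · exact h
          · exact absurd h hnRB
      · rcases Nat.lt_or_ge j i with h | h
        · exact hmax j h hrj
        · have : j = i := by omega
          subst this
          exact absurd (pvReach_RB hrj) hnRB

-- ===== VERDICT (by name: the statement is the Claim_ definition above) =====
theorem generate_prefix_spec : Claim_equal_generate_prefix := by
  intro s primitives _
  show (PySem.List.max? (pvBfs s.toList (primitives.map String.toList)
        ((s.toList.length + 1) * ((primitives.map String.toList).length + 1) + 1)
        [0] PySem.Set.empty) (fun x => x)).getD 0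
      = (((List.range (s.toList.length + 1)).foldl
          (pvStep s.toList s.toList.length (PySem.Set.ofList (primitives.map String.toList))
            (PySem.Set.ofList (primitives.map (fun p => p.toList.length))))
          ((List.replicate (s.toList.length + 1) false).set 0 true, 0)).2 : Int)
  have hmap : primitives.map (fun p => p.toList.length)
      = (primitives.map String.toList).map List.length := by
    rw [List.map_map]; rfl
  rw [hmap]
  obtain ⟨hlen, hiff, h0, hpos⟩ := pvScan_inv (cs := s.toList)
    (prims := primitives.map String.toList) (s.toList.length + 1) (by omega) _ rfl
  obtain ⟨hreach, hblt, hmax⟩ := hpos (by omega)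
  set best := ((List.range (s.toList.length + 1)).foldl
      (pvStep s.toList s.toList.length (PySem.Set.ofList (primitives.map String.toList))
        (PySem.Set.ofList ((primitives.map String.toList).map List.length)))
      ((List.replicate (s.toList.length + 1) false).set 0 true, 0)).2 with hbest
  set vis := pvBfs s.toList (primitives.map String.toList)
      ((s.toList.length + 1) * ((primitives.map String.toList).length + 1) + 1)
      [0] PySem.Set.empty with hvis
  cases hmx : PySem.List.max? vis (fun x => x) with
  | none =>
    exfalso
    have hempty : vis = [] := (PySem.List.max?_eq_none_iff _ _).1 hmx
    have h0m : (0 : Int) ∈ vis := (pvA_mem 0).2 ⟨0, pvReach_zero _ _, rfl⟩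
    rw [hempty] at h0m
    simp at h0m
  | some v =>
    obtain ⟨m, hm, rfl⟩ := (pvA_mem v).1 (PySem.List.max?_mem hmx)
    have hmb : m ≤ best := hmax m (by have := pvReach_le hm; omega) hm
    have hbm : (best : Int) ≤ (m : Int) :=
      PySem.List.max?_isMax hmx _ ((pvA_mem (best : Int)).2 ⟨best, hreach, rfl⟩)
    have : m = best := by omega
    subst this
    rfl
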